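-- pv_equiv track=rewrite | github.com/rakeshpaal/SynergyMesh | workspace/src/automation/self_awareness_report.py | _split_bullets
-- ===== SOURCE A (Python) =====
-- def _split_bullets(section_text: str) -> list[str]:
--     bullets: list[str] = []
--     current: list[str] = []
--
--     for raw_line in section_text.splitlines():
--         stripped = raw_line.strip()
--
--         if stripped.startswith("- "):
--             if current:
--                 bullets.append(" ".join(current).strip())
--                 current = []
--             current.append(stripped[2:].strip())
--         elif stripped and current:
--             current.append(stripped)
--
--     if current:
--         bullets.append(" ".join(current).strip())
--
--     return bullets
-- ===== SOURCE B (Python) =====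
-- def _split_bullets(section_text: str) -> list[str]:
--     # Pass 1: tag every contributing line with the index of its bullet.
--     idx = 0
--     pairs = []
--     for raw_line in section_text.splitlines():
--         stripped = raw_line.strip()
--         if stripped.startswith("- "):
--             idx += 1
--             pairs.append((idx, stripped[2:].strip()))
--         elif stripped and idx >= 1:
--             pairs.append((idx, stripped))
--     # Pass 2: group the tagged lines by bullet index and join each group.
--     table = {}
--     for i, text in pairs:
--         table[i] = table.get(i, []) + [text]
--     return [" ".join(texts).strip() for texts in table.values()]
-- ===== Notes on version B (the rewrite author's own statement) =====
-- stated objective: alternative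
-- what changed: Replaces A's single-pass accumulator (flushed at each '- ' marker and once at the end) with a two-pass tag-then-group scheme: pass 1 tags every contributing line with its bullet index, pass 2 groups the tagged lines by index in a dict and joins each group.
import Mathlib
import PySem

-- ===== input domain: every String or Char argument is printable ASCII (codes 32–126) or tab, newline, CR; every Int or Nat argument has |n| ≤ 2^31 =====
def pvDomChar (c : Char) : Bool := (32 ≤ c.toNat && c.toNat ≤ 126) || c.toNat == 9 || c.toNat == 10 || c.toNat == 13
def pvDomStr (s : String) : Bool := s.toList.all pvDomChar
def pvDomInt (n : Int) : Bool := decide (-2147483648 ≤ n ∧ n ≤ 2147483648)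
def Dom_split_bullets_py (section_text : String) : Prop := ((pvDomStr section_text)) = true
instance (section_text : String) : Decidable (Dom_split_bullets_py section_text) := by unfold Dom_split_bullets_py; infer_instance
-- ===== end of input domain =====

-- B rewrites A's flush-at-marker accumulator as a two-pass tag-then-group-by-bullet-index
-- table (objective: alternative decomposition, same asymptotic cost; return value only).

-- shared by both ports: " ".join(parts).strip()
def pvJoinStrip (parts : List String) : String :=
  PySem.Str.strip (PySem.Str.join " " parts)

-- ===== PORT A =====
-- one loop iteration of A: state = (bullets, current)
def pvStepA (st : List String × List String) (raw_line : String) : List String × List String :=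
  let stripped := PySem.Str.strip raw_line
  if PySem.Str.startswith stripped "- " then
    let bullets := if st.2 = [] then st.1 else st.1 ++ [pvJoinStrip st.2]
    (bullets, [PySem.Str.strip (PySem.Str.slice stripped (some 2) none)])
  else if stripped ≠ "" ∧ st.2 ≠ [] then
    (st.1, st.2 ++ [stripped])
  else
    st

def split_bullets_py (section_text : String) : List String :=
  let st := (PySem.Str.splitlines section_text).foldl pvStepA ([], [])
  if st.2 = [] then st.1 else st.1 ++ [pvJoinStrip st.2]

-- ===== PORT B =====
-- pass 1, one iteration: state = (idx, pairs)
def pvStepB (st : Int × List (Int × String)) (raw_line : String) : Int × List (Int × String) :=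
  let stripped := PySem.Str.strip raw_line
  if PySem.Str.startswith stripped "- " then
    (st.1 + 1, st.2 ++ [(st.1 + 1, PySem.Str.strip (PySem.Str.slice stripped (some 2) none))])
  else if stripped ≠ "" ∧ 1 ≤ st.1 then
    (st.1, st.2 ++ [(st.1, stripped)])
  else
    st

-- pass 2, one iteration: table[i] = table.get(i, []) + [text]
def pvStepD (d : PySem.Dict Int (List String)) (p : Int × String) : PySem.Dict Int (List String) :=
  d.modify p.1 [] (· ++ [p.2])

def split_bullets_py_alt (section_text : String) : List String :=
  let pairs := ((PySem.Str.splitlines section_text).foldl pvStepB (0, [])).2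
  let table := pairs.foldl pvStepD PySem.Dict.empty
  table.values.map pvJoinStrip

-- ===== PRECONDITION & SPEC =====
def Spec_split_bullets_py (section_text : String) (out : List String) : Prop := out = split_bullets_py_alt section_text
instance (section_text : String) (out : List String) : Decidable (Spec_split_bullets_py section_text out) := by unfold Spec_split_bullets_py; infer_instance

-- ===== CLAIM (what is proved, stated in full; the proofs are below) =====
def Claim_equal_split_bullets_py : Prop := ∀ (section_text : String), Dom_split_bullets_py section_text → Spec_split_bullets_py section_text (split_bullets_py section_text)

-- ===== LEMMAS AND PROOFS =====

-- A's bullets list is only ever appended to: factor the seed out of the fold.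
theorem pvFoldA_shift (ls : List String) (b c : List String) :
    ls.foldl pvStepA (b, c)
      = (b ++ (ls.foldl pvStepA ([], c)).1, (ls.foldl pvStepA ([], c)).2) := by
  induction ls generalizing b c with
  | nil => simp
  | cons l ls ih =>
    simp only [List.foldl_cons, pvStepA]
    split_ifs with h1 hc h2
    · exact ih b _
    · simp only [List.nil_append]
      rw [ih (b ++ [pvJoinStrip c]), ih [pvJoinStrip c]]
      simp [List.append_assoc]
    · exact ih b _
    · exact ih b c

-- the pairs B's pass 1 emits for the remaining lines, given the current bullet index
def pvEmit (ls : List String) (idx : Int) : List (Int × String) :=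
  match ls with
  | [] => []
  | l :: ls =>
    let stripped := PySem.Str.strip l
    if PySem.Str.startswith stripped "- " then
      (idx + 1, PySem.Str.strip (PySem.Str.slice stripped (some 2) none)) :: pvEmit ls (idx + 1)
    else if stripped ≠ "" ∧ 1 ≤ idx then
      (idx, stripped) :: pvEmit ls idx
    else
      pvEmit ls idx

theorem pvFoldB_emit (ls : List String) (idx : Int) (ps : List (Int × String)) :
    (ls.foldl pvStepB (idx, ps)).2 = ps ++ pvEmit ls idx := by
  induction ls generalizing idx ps with
  | nil => simp [pvEmit]
  | cons l ls ih =>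
    simp only [List.foldl_cons, pvStepB, pvEmit]
    split_ifs <;> simp [ih]

theorem pvEmit_keys (ls : List String) (idx : Int) :
    ∀ p ∈ pvEmit ls idx, idx ≤ p.1 := by
  induction ls generalizing idx with
  | nil => simp [pvEmit]
  | cons l ls ih =>
    intro p hp
    simp only [pvEmit] at hp
    split_ifs at hp with h1 h2
    · rcases List.mem_cons.mp hp with h | h
      · simp [h]
      · have := ih (idx + 1) p h; omega
    · rcases List.mem_cons.mp hp with h | h
      · simp [h]
      · exact ih idx p h
    · exact ih idx p hp

-- entries whose keys never occur in the updates stay untouched at the front of the table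
theorem pvFoldD_front (ps : List (Int × String)) (front : List (Int × (List String)))
    (d : PySem.Dict Int (List String))
    (hdisj : ∀ p ∈ ps, ∀ q ∈ front, q.1 ≠ p.1) :
    ps.foldl pvStepD (PySem.Dict.mk (front ++ d.items))
      = PySem.Dict.mk (front ++ (ps.foldl pvStepD d).items) := by
  induction ps generalizing d with
  | nil => simp
  | cons p ps ih =>
    have hne : ∀ q ∈ front, (q.1 == p.1) = false := by
      intro q hq
      simpa using hdisj p (List.mem_cons_self ..) q hq
    have hfind : front.find? (fun q => q.1 == p.1) = none := by
      rw [List.find?_eq_none]; intro q hq; simp [hne q hq]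
    have hany : front.any (fun q => q.1 == p.1) = false := by
      rw [List.any_eq_false]; intro q hq; simp [hne q hq]
    have hcont : (PySem.Dict.mk (front ++ d.items)).contains p.1 = d.contains p.1 := by
      simp [PySem.Dict.contains, PySem.Dict.items, List.any_append, hany]
    have hget : (PySem.Dict.mk (front ++ d.items)).getD p.1 [] = d.getD p.1 [] := by
      simp [PySem.Dict.getD, PySem.Dict.get?, PySem.Dict.items, List.find?_append, hfind]
    have hmap : ∀ w : List String,
        front.map (fun q => if (q.1 == p.1) = true then (p.1, w) else q) = front := by
      intro w
      rw [List.map_congr_left (g := id) (fun q hq => by simp [hne q hq])]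
      exact List.map_id front
    have hstep : pvStepD (PySem.Dict.mk (front ++ d.items)) p
        = PySem.Dict.mk (front ++ (pvStepD d p).items) := by
      simp only [pvStepD, PySem.Dict.modify, PySem.Dict.insert, hcont, hget]
      split_ifs with h
      · simp only [PySem.Dict.items, List.map_append, hmap]
      · simp [PySem.Dict.items, List.append_assoc]
    rw [List.foldl_cons, List.foldl_cons, hstep]
    exact ih (pvStepD d p) (fun r hr q hq => hdisj r (List.mem_cons_of_mem _ hr) q hq)

-- the open group as a one-entry table (empty before the first bullet)
def pvDInit (idx : Int) (cur : List String) : PySem.Dict Int (List String) :=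
  if idx = 0 then PySem.Dict.empty else PySem.Dict.mk [(idx, cur)]

-- main invariant: finishing A from state ([], cur) = grouping B's remaining tagged lines
-- on top of the open group (idx, cur)
-- A's finishing step (final flush of current)
def pvFinishA (st : List String × List String) : List String :=
  if st.2 = [] then st.1 else st.1 ++ [pvJoinStrip st.2]

theorem pvFinishA_shift (ls : List String) (b c : List String) :
    pvFinishA (ls.foldl pvStepA (b, c)) = b ++ pvFinishA (ls.foldl pvStepA ([], c)) := by
  unfold pvFinishA
  rw [pvFoldA_shift]
  split_ifs <;> simp [List.append_assoc]

theorem pvMain (ls : List String) (cur : List String) (idx : Int)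
    (h0 : 0 ≤ idx) (h : cur = [] ↔ idx = 0) :
    pvFinishA (ls.foldl pvStepA ([], cur))
      = ((pvEmit ls idx).foldl pvStepD (pvDInit idx cur)).values.map pvJoinStrip := by
  induction ls generalizing cur idx with
  | nil =>
    by_cases hc : cur = []
    · have h1 : idx = 0 := h.mp hc
      simp [pvFinishA, hc, h1, pvEmit, pvDInit, PySem.Dict.empty, PySem.Dict.values]
    · have hidx : ¬ idx = 0 := fun h' => hc (h.mpr h')
      simp [pvFinishA, hc, hidx, pvEmit, pvDInit, PySem.Dict.values, PySem.Dict.items]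
  | cons l ls ih =>
    simp only [List.foldl_cons]
    by_cases hb : PySem.Str.startswith (PySem.Str.strip l) "- " = true
    · -- bullet line: flush, open group idx+1
      set t := PySem.Str.strip (PySem.Str.slice (PySem.Str.strip l) (some 2) none) with ht
      have hbeq : (idx == idx + 1) = false := by simp
      have hstepA : pvStepA ([], cur) l
          = ((if cur = [] then ([] : List String) else [pvJoinStrip cur]), [t]) := by
        simp only [pvStepA, List.nil_append]
        rw [if_pos hb]
      have hstepD : pvStepD (pvDInit idx cur) (idx + 1, t)
          = PySem.Dict.mk ((pvDInit idx cur).items ++ [(idx + 1, [t])]) := by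
        by_cases hi : idx = 0 <;>
          simp [pvDInit, hi, pvStepD, PySem.Dict.modify, PySem.Dict.insert,
            PySem.Dict.contains, PySem.Dict.getD, PySem.Dict.get?, PySem.Dict.items,
            PySem.Dict.empty, hbeq]
      have hfront : (pvEmit ls (idx + 1)).foldl pvStepD
            (PySem.Dict.mk ((pvDInit idx cur).items ++ (PySem.Dict.mk [(idx + 1, [t])]).items))
          = PySem.Dict.mk ((pvDInit idx cur).items
              ++ ((pvEmit ls (idx + 1)).foldl pvStepD (PySem.Dict.mk [(idx + 1, [t])])).items) := by
        apply pvFoldD_front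
        intro p hp q hq
        have hk := pvEmit_keys ls (idx + 1) p hp
        by_cases hi : idx = 0
        · simp [pvDInit, hi, PySem.Dict.empty, PySem.Dict.items] at hq
        · simp only [pvDInit, if_neg hi, PySem.Dict.items, List.mem_singleton] at hq
          rw [hq]
          simp only [ne_eq]
          omega
      have hinit : PySem.Dict.mk [(idx + 1, [t])] = pvDInit (idx + 1) [t] := by
        unfold pvDInit
        rw [if_neg (show ¬ idx + 1 = 0 by omega)]
      have hih := ih [t] (idx + 1) (by omega)
        (by constructor
            · intro hx; simp at hx
            · intro hx; omega)
      rw [hstepA, pvFinishA_shift]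
      have hemit : pvEmit (l :: ls) idx = (idx + 1, t) :: pvEmit ls (idx + 1) := by
        simp only [pvEmit]
        rw [if_pos hb]
      rw [hemit, List.foldl_cons, hstepD]
      rw [show ((pvDInit idx cur).items ++ [(idx + 1, [t])])
            = ((pvDInit idx cur).items ++ (PySem.Dict.mk [(idx + 1, [t])]).items) from rfl,
          hfront, hinit]
      have hvals : (PySem.Dict.mk ((pvDInit idx cur).items
            ++ ((pvEmit ls (idx + 1)).foldl pvStepD (pvDInit (idx + 1) [t])).items)).values
          = (pvDInit idx cur).values
            ++ ((pvEmit ls (idx + 1)).foldl pvStepD (pvDInit (idx + 1) [t])).values := by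
        simp [PySem.Dict.values, PySem.Dict.items]
      rw [hvals, List.map_append, hih]
      by_cases hc : cur = []
      · have hi : idx = 0 := h.mp hc
        simp [hc, hi, pvDInit, PySem.Dict.empty, PySem.Dict.values]
      · have hi : ¬ idx = 0 := fun h' => hc (h.mpr h')
        simp [hc, hi, pvDInit, PySem.Dict.values, PySem.Dict.items]
    · by_cases hcont : PySem.Str.strip l ≠ "" ∧ cur ≠ []
      · -- continuation line
        have hi : ¬ idx = 0 := fun h' => hcont.2 (h.mpr h')
        have hstepA : pvStepA ([], cur) l = ([], cur ++ [PySem.Str.strip l]) := by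
          simp only [pvStepA]
          rw [if_neg hb, if_pos hcont]
        have hstepD : pvStepD (pvDInit idx cur) (idx, PySem.Str.strip l)
            = pvDInit idx (cur ++ [PySem.Str.strip l]) := by
          simp [pvDInit, hi, pvStepD, PySem.Dict.modify, PySem.Dict.insert,
            PySem.Dict.contains, PySem.Dict.getD, PySem.Dict.get?, PySem.Dict.items]
        have hemit : pvEmit (l :: ls) idx = (idx, PySem.Str.strip l) :: pvEmit ls idx := by
          simp only [pvEmit]
          rw [if_neg hb, if_pos ⟨hcont.1, by omega⟩]
        rw [hstepA, hemit, List.foldl_cons, hstepD]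
        exact ih (cur ++ [PySem.Str.strip l]) idx h0 (by simp [hi])
      · -- skipped line
        have hstepA : pvStepA ([], cur) l = ([], cur) := by
          simp only [pvStepA]
          rw [if_neg hb, if_neg hcont]
        have hskip : ¬ (PySem.Str.strip l ≠ "" ∧ 1 ≤ idx) := by
          intro hx
          exact hcont ⟨hx.1, fun hc => by have := h.mp hc; omega⟩
        have hemit : pvEmit (l :: ls) idx = pvEmit ls idx := by
          simp only [pvEmit]
          rw [if_neg hb, if_neg hskip]
        rw [hstepA, hemit]
        exact ih cur idx h0 h

-- ===== VERDICT (by name: the statement is the Claim_ definition above) =====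
theorem split_bullets_py_spec : Claim_equal_split_bullets_py := by
  intro section_text _
  unfold Spec_split_bullets_py split_bullets_py split_bullets_py_alt
  rw [pvFoldB_emit]
  simpa [pvDInit] using
    pvMain (PySem.Str.splitlines section_text) [] 0 le_rfl (by simp)
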